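-- pv_equiv track=rewrite | github.com/kanikagarg/CodePracticeDSA | consecutive_letter_lt3_word.py | find_charinsertion_count
-- ===== SOURCE A (Python) =====
-- def find_charinsertion_count(word):
--     prev_char = word[0]
--     char_count = 1
--     insertion_count = 0
--     for char in word[1:]:
--         if char == prev_char:
--             char_count += 1
--         else:
--             char_count = 1
--         if char_count == 3:
--             insertion_count += 1
--             char_count = 1
--         prev_char = char
--     return insertion_count
-- ===== SOURCE B (Python) =====
-- def find_charinsertion_count(word):
--     # Run-length decomposition: each maximal run of length L needs (L - 1) // 2 insertions.
--     return sum((L - 1) // 2 for L in _run_lengths(word))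
--
-- def _run_lengths(word):
--     # lengths of the maximal runs of equal adjacent characters, in order
--     if not word:
--         return []
--     runs = []
--     cur, n = word[0], 1
--     for ch in word[1:]:
--         if ch == cur:
--             n += 1
--         else:
--             runs.append(n)
--             cur, n = ch, 1
--     runs.append(n)
--     return runs
-- ===== Notes on version B (the rewrite author's own statement) =====
-- stated objective: alternative
-- what changed: Replaces A's per-character 1-2-3-reset counter with a run-length decomposition: compute the lengths of the maximal runs of equal adjacent characters, then sum the closed-form (L-1)//2 per run.
import Mathlib
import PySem

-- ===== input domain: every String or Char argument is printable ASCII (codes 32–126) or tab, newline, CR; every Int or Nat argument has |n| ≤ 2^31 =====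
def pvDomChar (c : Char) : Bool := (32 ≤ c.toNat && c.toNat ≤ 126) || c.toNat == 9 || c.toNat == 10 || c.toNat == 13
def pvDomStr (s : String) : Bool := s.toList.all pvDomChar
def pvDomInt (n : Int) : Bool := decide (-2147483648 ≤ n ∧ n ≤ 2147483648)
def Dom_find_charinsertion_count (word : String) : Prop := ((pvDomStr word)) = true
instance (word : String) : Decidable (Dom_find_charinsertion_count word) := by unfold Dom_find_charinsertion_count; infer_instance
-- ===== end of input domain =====

-- B counts insertions by run-length decomposition ((L-1)//2 per maximal run) instead of
-- A's per-character 1-2-3-reset counter; same O(n) cost, B returns 0 on "" where A raises.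

-- ===== PORT A =====
-- one fold step of A's for-loop; state = (prev_char, char_count, insertion_count)
def pvAStep (st : Char × Int × Int) (char : Char) : Char × Int × Int :=
  let cnt := if char == st.1 then st.2.1 + 1 else 1
  if cnt == 3 then (char, 1, st.2.2 + 1) else (char, cnt, st.2.2)

def find_charinsertion_count (word : String) : Int :=
  match word.toList with
  | [] => 0  -- Python raises IndexError here (word[0]); excluded by Pre_
  | c :: rest => (rest.foldl pvAStep (c, 1, 0)).2.2

-- ===== PORT B =====
-- Source B's _run_lengths loop: lengths of the maximal runs of equal adjacent characters
def pvRunLengths (cur : Char) (n : Nat) : List Char → List Nat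
  | [] => [n]
  | ch :: rest => if ch == cur then pvRunLengths cur (n + 1) rest
                  else n :: pvRunLengths ch 1 rest

def find_charinsertion_count_alt (word : String) : Int :=
  match word.toList with
  | [] => 0
  | c :: rest => (((pvRunLengths c 1 rest).map (fun L => (L - 1) / 2)).sum : Nat)

-- ===== PRECONDITION & SPEC =====
-- Pre_ excludes only the empty string, on which A raises IndexError at word[0].
def Pre_find_charinsertion_count (word : String) : Prop := word ≠ ""
instance (word : String) : Decidable (Pre_find_charinsertion_count word) := by unfold Pre_find_charinsertion_count; infer_instance
def pvWitness_find_charinsertion_count : String := "aabaaa"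

def Spec_find_charinsertion_count (word : String) (out : Int) : Prop := out = find_charinsertion_count_alt word
instance (word : String) (out : Int) : Decidable (Spec_find_charinsertion_count word out) := by unfold Spec_find_charinsertion_count; infer_instance

-- ===== CLAIM (what is proved, stated in full; the proofs are below) =====
def Claim_equal_find_charinsertion_count : Prop := ∀ (word : String), Dom_find_charinsertion_count word → Pre_find_charinsertion_count word → Spec_find_charinsertion_count word (find_charinsertion_count word)
-- ===== LEMMAS AND PROOFS =====

-- Key invariant of A's fold: if the current run of `c` has length n so far, A's counter is
-- (n-1) % 2 + 1 and its pending insertions are (n-1)/2; the final insertion count is then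
-- ins minus the pending part plus the run-length sum over the rest of the input.
theorem pvA_fold_key (l : List Char) : ∀ (c : Char) (n : Nat) (ins : Int), 1 ≤ n →
    (l.foldl pvAStep (c, (((n - 1) % 2 : Nat) : Int) + 1, ins)).2.2
      = ins - (((n - 1) / 2 : Nat) : Int)
          + (((pvRunLengths c n l).map (fun L => (L - 1) / 2)).sum : Nat) := by
  induction l with
  | nil => intro c n ins _; simp [pvRunLengths]
  | cons x xs ih =>
    intro c n ins hn
    by_cases hx : x = c
    · subst hx
      have hstep : pvAStep (x, (((n - 1) % 2 : Nat) : Int) + 1, ins) x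
          = (x, (((n % 2 : Nat) : Int)) + 1, ins + (((n - 1) % 2 : Nat) : Int)) := by
        rcases Nat.mod_two_eq_zero_or_one (n - 1) with h | h <;>
        · have hn2 : n % 2 = 1 - (n - 1) % 2 := by omega
          simp [pvAStep, h, hn2]
      have h' := ih x (n + 1) (ins + (((n - 1) % 2 : Nat) : Int)) (by omega)
      simp only [List.foldl_cons, hstep, Nat.add_sub_cancel] at h' ⊢
      rw [h']
      have hruns : pvRunLengths x n (x :: xs) = pvRunLengths x (n + 1) xs := by
        simp [pvRunLengths]
      rw [hruns]
      have : ((n % 2 : Nat) : Int) = (((n + 1 - 1) % 2 : Nat) : Int) := by norm_num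
      omega
    · have hbe : (x == c) = false := by simp [hx]
      have hstep : pvAStep (c, (((n - 1) % 2 : Nat) : Int) + 1, ins) x = (x, 1, ins) := by
        simp [pvAStep, hbe]
      have h' := ih x 1 ins (by omega)
      simp only [List.foldl_cons, hstep]
      have h1 : (((1 - 1) % 2 : Nat) : Int) + 1 = 1 := by norm_num
      rw [← h1, h']
      have hruns : pvRunLengths c n (x :: xs) = n :: pvRunLengths x 1 xs := by
        simp [pvRunLengths, hbe]
      rw [hruns]
      simp only [List.map_cons, List.sum_cons]
      omega

theorem find_charinsertion_count_spec : Claim_equal_find_charinsertion_count := by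
  intro word _ hpre
  rcases hw : word.toList with _ | ⟨c, rest⟩
  · exact absurd (String.toList_eq_nil_iff.mp hw) hpre
  · have h := pvA_fold_key rest c 1 0 (by omega)
    simp only [Spec_find_charinsertion_count, find_charinsertion_count,
      find_charinsertion_count_alt, hw]
    simpa using h
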